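-- pv_equiv track=rewrite | github.com/Qi-Sun/SuzhouProjects | CityMotif/Pycode/src/mobility.py | separate_city_list_by_residence_city
-- ===== SOURCE A (Python) =====
-- def separate_city_list_by_residence_city(city_list, residence_city):
--     rst = []
--     for route in city_list:
--         if residence_city not in route:
--             rst.append(route)
--         else:
--             tmp_citys = []
--             for i in range(0, len(route)):
--                 tmp_citys.append(route[i])
--                 if route[i] == residence_city:
--                     rst.append(tmp_citys)
--                     tmp_citys = []
--     return rst
-- ===== SOURCE B (Python) =====
-- def separate_city_list_by_residence_city(city_list, residence_city):
--     rst = []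
--     for route in city_list:
--         if residence_city not in route:
--             rst.append(route)
--         else:
--             positions = [i for i, c in enumerate(route) if c == residence_city]
--             start = -1
--             for p in positions:
--                 rst.append(route[start + 1:p + 1])
--                 start = p
--     return rst
-- ===== Notes on version B (the rewrite author's own statement) =====
-- stated objective: alternative
-- what changed: Instead of growing a temporary segment element by element and resetting it at each match, B first collects the indices of the residence city and then emits each segment as a single slice between consecutive occurrences.
import Mathlib
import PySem

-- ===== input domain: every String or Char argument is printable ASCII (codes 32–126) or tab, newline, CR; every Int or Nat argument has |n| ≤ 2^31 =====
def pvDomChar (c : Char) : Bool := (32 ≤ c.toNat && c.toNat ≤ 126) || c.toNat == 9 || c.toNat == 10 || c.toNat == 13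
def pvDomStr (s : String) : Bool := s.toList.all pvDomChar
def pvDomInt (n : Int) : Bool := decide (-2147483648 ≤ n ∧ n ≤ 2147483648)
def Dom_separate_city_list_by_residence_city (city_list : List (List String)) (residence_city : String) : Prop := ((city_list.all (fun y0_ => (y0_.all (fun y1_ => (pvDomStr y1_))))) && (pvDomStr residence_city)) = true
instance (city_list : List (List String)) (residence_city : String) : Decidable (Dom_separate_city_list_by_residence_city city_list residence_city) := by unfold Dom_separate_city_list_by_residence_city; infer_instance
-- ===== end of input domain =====

-- B replaces A's element-by-element temporary-segment accumulation by collecting the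
-- occurrence indices of residence_city and slicing out each segment (alternative decomposition).

-- ===== PORT A =====
-- inner loop body of A: append route[i] to tmp_citys, flush tmp_citys into rst on a match
def pvStepA (rc : String) (st : List (List String) × List String) (city : String) :
    List (List String) × List String :=
  let tmp := st.2 ++ [city]
  if city == rc then (st.1 ++ [tmp], []) else (st.1, tmp)

def separate_city_list_by_residence_city (city_list : List (List String)) (residence_city : String) : List (List String) :=
  city_list.foldl
    (fun rst route =>
      if !(route.contains residence_city) then rst ++ [route]
      else (route.foldl (pvStepA residence_city) (rst, [])).1)
    []

-- ===== PORT B =====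
-- [i for i, c in enumerate(route) if c == residence_city], with running index k
def pvPositions (rc : String) : Nat → List String → List Int
  | _, [] => []
  | k, c :: cs => if c == rc then (k : Int) :: pvPositions rc (k + 1) cs else pvPositions rc (k + 1) cs

def separate_city_list_by_residence_city_alt (city_list : List (List String)) (residence_city : String) : List (List String) :=
  city_list.foldl
    (fun rst route =>
      if !(route.contains residence_city) then rst ++ [route]
      else
        ((pvPositions residence_city 0 route).foldl
          (fun (st : List (List String) × Int) p =>
            (st.1 ++ [PySem.List.slice route (some (st.2 + 1)) (some (p + 1))], p))
          (rst, -1)).1)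
    []

-- ===== PRECONDITION & SPEC =====
def Spec_separate_city_list_by_residence_city (city_list : List (List String)) (residence_city : String) (out : List (List String)) : Prop := out = separate_city_list_by_residence_city_alt city_list residence_city
instance (city_list : List (List String)) (residence_city : String) (out : List (List String)) : Decidable (Spec_separate_city_list_by_residence_city city_list residence_city out) := by unfold Spec_separate_city_list_by_residence_city; infer_instance

-- ===== CLAIM (what is proved, stated in full; the proofs are below) =====
def Claim_equal_separate_city_list_by_residence_city : Prop := ∀ (city_list : List (List String)) (residence_city : String), Dom_separate_city_list_by_residence_city city_list residence_city → Spec_separate_city_list_by_residence_city city_list residence_city (separate_city_list_by_residence_city city_list residence_city)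

-- ===== LEMMAS AND PROOFS =====

-- extending the pending segment by the element sitting at index k of orig
lemma pvTake_snoc (orig : List String) (c : String) (cs : List String) (k s : Nat)
    (hd : orig.drop k = c :: cs) (hs : s ≤ k) :
    (orig.drop s).take (k - s) ++ [c] = (orig.drop s).take (k + 1 - s) := by
  have hget : (orig.drop s)[k - s]? = some c := by
    have : (orig.drop s).drop (k - s) = c :: cs := by
      rw [List.drop_drop]
      have h : s + (k - s) = k := by omega
      rw [h, hd]
    have h2 : ((orig.drop s).drop (k - s)).head? = some c := by rw [this]; rfl
    rwa [List.head?_drop] at h2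
  have : k + 1 - s = (k - s) + 1 := by omega
  rw [this, List.take_succ, hget]
  rfl

-- main loop invariant: A's inner fold from (acc, tmp) equals B's slice fold from (acc, s-1),
-- where route = orig.drop k, s ≤ k, and tmp = orig[s:k]
lemma pvInner (rc : String) (orig : List String) :
    ∀ (route : List String) (k s : Nat) (acc : List (List String)),
      orig.drop k = route → s ≤ k →
      (route.foldl (pvStepA rc) (acc, (orig.drop s).take (k - s))).1
        = ((pvPositions rc k route).foldl
            (fun (st : List (List String) × Int) p =>
              (st.1 ++ [PySem.List.slice orig (some (st.2 + 1)) (some (p + 1))], p))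
            (acc, (s : Int) - 1)).1 := by
  intro route
  induction route with
  | nil => intro k s acc _ _; simp [pvPositions]
  | cons c cs ih =>
    intro k s acc hd hs
    have hd' : orig.drop (k + 1) = cs := by
      have h := congrArg List.tail hd
      rwa [List.tail_drop] at h
    by_cases hc : c == rc
    · simp only [List.foldl_cons, pvStepA, hc, if_pos, pvPositions, List.foldl_cons]
      have hslice : PySem.List.slice orig (some ((s : Int) - 1 + 1)) (some ((k : Int) + 1))
          = (orig.drop s).take (k - s) ++ [c] := by
        rw [pvTake_snoc orig c cs k s hd hs]
        have h1 : ((s : Int) - 1 + 1) = ((s : Nat) : Int) := by omega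
        have h2 : ((k : Int) + 1) = (((k + 1 : Nat)) : Int) := by push_cast; ring
        rw [h1, h2, PySem.List.slice_natCast]
      rw [hslice]
      have hk : ((k : Int)) = (((k + 1 : Nat)) : Int) - 1 := by push_cast; ring
      have h0 : (orig.drop (k + 1)).take (k + 1 - (k + 1)) = ([] : List String) := by simp
      have := ih (k + 1) (k + 1) (acc ++ [(orig.drop s).take (k - s) ++ [c]]) hd' (le_refl _)
      rw [h0] at this
      rw [hk]
      exact this
    · simp only [List.foldl_cons, pvStepA, hc, if_neg, pvPositions, Bool.false_eq_true,
        not_false_iff]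
      rw [pvTake_snoc orig c cs k s hd hs]
      exact ih (k + 1) s acc hd' (by omega)

lemma pvStepEq (rc : String) (rst : List (List String)) (route : List String) :
    (if !(route.contains rc) then rst ++ [route]
      else (route.foldl (pvStepA rc) (rst, [])).1)
    = (if !(route.contains rc) then rst ++ [route]
      else ((pvPositions rc 0 route).foldl
        (fun (st : List (List String) × Int) p =>
          (st.1 ++ [PySem.List.slice route (some (st.2 + 1)) (some (p + 1))], p))
        (rst, -1)).1) := by
  cases h : route.contains rc
  · simp only [h, Bool.not_false, if_pos]
  · simp only [h, Bool.not_true, Bool.false_eq_true, if_false]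
    have := pvInner rc route route 0 0 rst (by simp) (le_refl _)
    have h0 : (route.drop 0).take (0 - 0) = ([] : List String) := by simp
    have h1 : ((0 : Nat) : Int) - 1 = (-1 : Int) := by norm_num
    rw [h0, h1] at this
    exact this

-- ===== VERDICT (by name: the statement is the Claim_ definition above) =====
theorem separate_city_list_by_residence_city_spec : Claim_equal_separate_city_list_by_residence_city := by
  intro city_list residence_city _
  unfold Spec_separate_city_list_by_residence_city separate_city_list_by_residence_city
    separate_city_list_by_residence_city_alt
  congr 1
  funext rst route
  exact pvStepEq residence_city rst route
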